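-- pv_equiv track=rewrite | github.com/rmcculloch27/pdfParser | gInvoiceParser/extractor/dv360.py | buffer_and_merge_lines
-- ===== SOURCE A (Python) =====
-- def buffer_and_merge_lines(text_dict):
--     """
--     Smartly merge broken lines across pages if needed.
--     Returns a list of fully reconstructed logical lines.
--     """
--     lines = []
--     for page_num, page_data in text_dict.items():
--         page_text = page_data.get("text", "")
--         if page_text:
--             lines.extend(page_text.splitlines())
--
--     lines = [line.strip() for line in lines if line.strip()]
--
--     merged_lines = []
--     buffer = ""
--
--     for idx, line in enumerate(lines):
--         if any(
--             keyword in line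
--             for keyword in ["Media Cost", "Platform Fee", "Data Fee", "Adjustment"]
--         ):
--             if buffer:
--                 merged_lines.append(buffer.strip())
--             buffer = line
--         else:
--             buffer += " " + line
--
--     if buffer:
--         merged_lines.append(buffer.strip())
--
--     return merged_lines
-- ===== SOURCE B (Python) =====
-- KEYWORDS = ["Media Cost", "Platform Fee", "Data Fee", "Adjustment"]
--
--
-- def buffer_and_merge_lines(text_dict):
--     """
--     Boundary-and-slice reconstruction: find the keyword lines (group starts),
--     slice the cleaned line list into contiguous segments at those boundaries,
--     and join each segment with single spaces.
--     """
--     chunks = [page_data.get("text", "") for page_data in text_dict.values()]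
--     raw = [ln for chunk in chunks if chunk for ln in chunk.splitlines()]
--     lines = [line.strip() for line in raw if line.strip()]
--
--     def is_boundary(line):
--         return any(keyword in line for keyword in KEYWORDS)
--
--     segments = []
--     i = 0
--     n = len(lines)
--     while i < n:
--         j = i + 1
--         while j < n and not is_boundary(lines[j]):
--             j += 1
--         segments.append(lines[i:j])
--         i = j
--
--     return [" ".join(segment) for segment in segments]
-- ===== Notes on version B (the rewrite author's own statement) =====
-- stated objective: alternative
-- what changed: Replaces the running string buffer with flush-on-keyword by a boundary scan that slices the cleaned line list into contiguous segments starting at each keyword line (plus the pre-keyword prefix) and joins each segment with spaces.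
import Mathlib
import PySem

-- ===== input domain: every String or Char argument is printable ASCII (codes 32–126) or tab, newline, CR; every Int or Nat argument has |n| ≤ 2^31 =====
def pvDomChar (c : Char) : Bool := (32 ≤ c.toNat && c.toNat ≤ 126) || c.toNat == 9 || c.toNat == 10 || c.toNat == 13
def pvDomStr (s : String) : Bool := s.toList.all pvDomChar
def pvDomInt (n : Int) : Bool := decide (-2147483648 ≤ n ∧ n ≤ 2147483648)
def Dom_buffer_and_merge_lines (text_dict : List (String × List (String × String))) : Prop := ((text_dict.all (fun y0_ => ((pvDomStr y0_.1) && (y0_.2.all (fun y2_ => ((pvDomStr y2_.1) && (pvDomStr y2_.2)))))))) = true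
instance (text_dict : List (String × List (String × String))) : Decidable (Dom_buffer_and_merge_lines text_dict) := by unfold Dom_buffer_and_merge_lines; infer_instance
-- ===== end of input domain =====

-- B replaces A's running string buffer (flush on keyword) by a boundary scan that slices the
-- cleaned line list into segments starting at each keyword line and joins each with spaces
-- (objective: alternative decomposition, same cost).

-- ===== PORT A =====
-- the 'any(keyword in line for keyword in [...])' test of A
def pvKwA (line : String) : Bool :=
  (["Media Cost", "Platform Fee", "Data Fee", "Adjustment"]).any
    (fun keyword => PySem.Str.isIn keyword line)

-- the body of A's merging loop (buffer/flush step)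
def pvStep (st : List String × String) (line : String) : List String × String :=
  if pvKwA line then
    ((if st.2 ≠ "" then st.1 ++ [PySem.Str.strip st.2] else st.1), line)
  else (st.1, st.2 ++ " " ++ line)

def buffer_and_merge_lines (text_dict : List (String × List (String × String))) : List String :=
  let lines0 := text_dict.foldl (fun acc p =>
      let page_text := PySem.Dict.getD ⟨p.2⟩ "text" ""
      if page_text ≠ "" then acc ++ PySem.Str.splitlines page_text else acc) []
  let lines := (lines0.filter (fun line => PySem.Str.strip line ≠ "")).map PySem.Str.strip
  let r := lines.foldl pvStep ([], "")
  if r.2 ≠ "" then r.1 ++ [PySem.Str.strip r.2] else r.1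

-- ===== PORT B =====
def pvKEYWORDS : List String := ["Media Cost", "Platform Fee", "Data Fee", "Adjustment"]

def pvIsBoundary (line : String) : Bool :=
  pvKEYWORDS.any (fun keyword => PySem.Str.isIn keyword line)

-- Source B's outer while loop: each iteration slices lines[i:j] where j is the next boundary
-- (the inner index scan 'while j < n and not is_boundary(lines[j])' is the takeWhile/dropWhile split)
def pvSegments : List String → List (List String)
  | [] => []
  | l :: rest =>
      (l :: rest.takeWhile (fun x => !pvIsBoundary x)) ::
        pvSegments (rest.dropWhile (fun x => !pvIsBoundary x))
  termination_by ls => ls.length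
  decreasing_by
    have := List.length_dropWhile_le (fun x => !pvIsBoundary x) rest
    simp; omega

def buffer_and_merge_lines_alt (text_dict : List (String × List (String × String))) : List String :=
  let chunks := text_dict.map (fun page_data => PySem.Dict.getD ⟨page_data.2⟩ "text" "")
  let raw := chunks.flatMap (fun chunk => if chunk ≠ "" then PySem.Str.splitlines chunk else [])
  let lines := (raw.filter (fun line => PySem.Str.strip line ≠ "")).map PySem.Str.strip
  (pvSegments lines).map (fun segment => PySem.Str.join " " segment)

-- ===== PRECONDITION & SPEC =====
def Spec_buffer_and_merge_lines (text_dict : List (String × List (String × String))) (out : List String) : Prop := out = buffer_and_merge_lines_alt text_dict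
instance (text_dict : List (String × List (String × String))) (out : List String) : Decidable (Spec_buffer_and_merge_lines text_dict out) := by unfold Spec_buffer_and_merge_lines; infer_instance

-- ===== CLAIM (what is proved, stated in full; the proofs are below) =====
def Claim_equal_buffer_and_merge_lines : Prop := ∀ (text_dict : List (String × List (String × String))), Dom_buffer_and_merge_lines text_dict → Spec_buffer_and_merge_lines text_dict (buffer_and_merge_lines text_dict)

-- ===== LEMMAS AND PROOFS =====

theorem pvKw_eq (line : String) : pvKwA line = pvIsBoundary line := rfl

-- "stripped and nonempty": nonempty, no leading space, no trailing space
def pvNS (cs : List Char) : Prop :=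
  cs ≠ [] ∧ PySem.Chars.isspace cs.head! = false ∧ PySem.Chars.isspace cs.reverse.head! = false

theorem pv_dw_head (p : Char → Bool) (l : List Char) (h : l.dropWhile p ≠ []) :
    p ((l.dropWhile p).head!) = false := by
  induction l with
  | nil => simp at h
  | cons x t ih =>
      rw [List.dropWhile_cons] at h ⊢
      by_cases hx : p x = true
      · rw [if_pos hx] at h ⊢; exact ih h
      · rw [if_neg hx] at h ⊢
        simp only [List.head!_cons]
        exact Bool.eq_false_iff.mpr hx

theorem pvNS_of_strip (cs : List Char) (h : PySem.Chars.strip cs ≠ []) :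
    pvNS (PySem.Chars.strip cs) := by
  have hdef : PySem.Chars.strip cs
      = ((PySem.Chars.lstrip cs).reverse.dropWhile PySem.Chars.isspace).reverse := rfl
  set u := PySem.Chars.lstrip cs with hu
  refine ⟨h, ?_, ?_⟩
  · -- head: strip cs is a prefix of u, whose head fails isspace
    have hpre : PySem.Chars.strip cs <+: u := by
      rw [hdef]
      have := List.dropWhile_suffix (l := u.reverse) PySem.Chars.isspace
      have := this.reverse
      simpa using this
    obtain ⟨t, ht⟩ := hpre
    have hune : u ≠ [] := by
      intro h0
      rw [h0] at ht; simp at ht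
      exact h (by rw [ht.1])
    have hhu : PySem.Chars.isspace u.head! = false := by
      have h1 : u.dropWhile PySem.Chars.isspace = u := by
        rw [hu]
        show (cs.dropWhile PySem.Chars.isspace).dropWhile PySem.Chars.isspace
            = cs.dropWhile PySem.Chars.isspace
        exact List.dropWhile_idempotent _ _
      have h2 := pv_dw_head PySem.Chars.isspace u (by rw [h1]; exact hune)
      rwa [h1] at h2
    obtain ⟨z, w, hz⟩ := List.exists_cons_of_ne_nil h
    rw [hz] at ht
    rw [hz]
    rw [← ht] at hhu
    simpa using hhu
  · rw [hdef, List.reverse_reverse]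
    apply pv_dw_head
    intro h0
    rw [hdef] at h
    simp [h0] at h

theorem pvNS_lstrip (cs : List Char) (h : pvNS cs) : PySem.Chars.lstrip cs = cs := by
  obtain ⟨hne, hh, -⟩ := h
  obtain ⟨x, t, rfl⟩ := List.exists_cons_of_ne_nil hne
  simp at hh
  show List.dropWhile _ _ = _
  rw [List.dropWhile_cons, hh]
  simp

theorem pvNS_rstrip (cs : List Char) (h : pvNS cs) : PySem.Chars.rstrip cs = cs := by
  obtain ⟨hne, -, hr⟩ := h
  have hrne : cs.reverse ≠ [] := by simpa using hne
  obtain ⟨y, s, hy⟩ := List.exists_cons_of_ne_nil hrne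
  rw [hy] at hr; simp at hr
  show (cs.reverse.dropWhile _).reverse = _
  rw [hy, List.dropWhile_cons, hr]
  simp [← hy]

theorem pv_lstrip_spaces (sp v : List Char) (h : ∀ c ∈ sp, PySem.Chars.isspace c = true) :
    PySem.Chars.lstrip (sp ++ v) = PySem.Chars.lstrip v := by
  induction sp with
  | nil => simp
  | cons x t ih =>
      show List.dropWhile _ _ = _
      rw [List.cons_append, List.dropWhile_cons, h x (by simp)]
      exact ih (fun c hc => h c (by simp [hc]))

theorem pv_strip_spaces (sp j : List Char) (hsp : ∀ c ∈ sp, PySem.Chars.isspace c = true)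
    (hj : pvNS j) : PySem.Chars.strip (sp ++ j) = j := by
  show PySem.Chars.rstrip (PySem.Chars.lstrip (sp ++ j)) = j
  rw [pv_lstrip_spaces sp j hsp, pvNS_lstrip j hj, pvNS_rstrip j hj]

theorem pvNS_append (a b : List Char) (ha : pvNS a) (hb : pvNS b) : pvNS (a ++ ' ' :: b) := by
  obtain ⟨hane, hah, -⟩ := ha
  obtain ⟨hbne, -, hbr⟩ := hb
  obtain ⟨x, t, rfl⟩ := List.exists_cons_of_ne_nil hane
  have hbrne : b.reverse ≠ [] := by simpa using hbne
  obtain ⟨y, s, hy⟩ := List.exists_cons_of_ne_nil hbrne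
  refine ⟨by simp, by simpa using hah, ?_⟩
  rw [hy] at hbr
  simp [List.reverse_append, hy] at hbr ⊢
  exact hbr

-- '" ".join(l :: t)' as the left fold that A's '+= " " + line' performs
def pvJF (s : String) (pre : List String) : String :=
  pre.foldl (fun a x => a ++ " " ++ x) s

theorem pv_ofList_append (u v : List Char) :
    String.ofList (u ++ v) = String.ofList u ++ String.ofList v := by simp

theorem pv_intercalate_cc (sep a b : List Char) (r : List (List Char)) :
    List.intercalate sep (a :: b :: r) = a ++ sep ++ List.intercalate sep (b :: r) := by
  simp [List.intercalate, List.intersperse]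

theorem pv_foldl_pull : ∀ (r : List (List Char)) (u v : List Char),
    r.foldl (fun acc x => acc ++ ' ' :: x) (u ++ v) = u ++ r.foldl (fun acc x => acc ++ ' ' :: x) v := by
  intro r
  induction r with
  | nil => intro u v; rfl
  | cons x t ih =>
      intro u v
      simp only [List.foldl_cons, List.append_assoc]
      exact ih u (v ++ ' ' :: x)

theorem pv_chars_join_foldl : ∀ (r : List (List Char)) (a : List Char),
    List.intercalate [' '] (a :: r) = r.foldl (fun acc x => acc ++ ' ' :: x) a := by
  intro r
  induction r with
  | nil => intro a; simp [List.intercalate, List.intersperse]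
  | cons x t ih =>
      intro a
      rw [pv_intercalate_cc, ih x, List.foldl_cons]
      have h2 := pv_foldl_pull t (a ++ [' ']) x
      simp only [List.append_assoc, List.singleton_append] at h2 ⊢
      exact h2.symm

theorem pv_ofList_foldl : ∀ (t : List String) (l : String),
    String.ofList ((t.map String.toList).foldl (fun acc x => acc ++ ' ' :: x) l.toList) = pvJF l t := by
  intro t
  induction t with
  | nil => intro l; simp [pvJF, String.ofList_toList]
  | cons x r ih =>
      intro l
      have h1 : l.toList ++ ' ' :: x.toList = (l ++ " " ++ x).toList := by
        simp [String.toList_append]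
      simp only [List.map_cons, List.foldl_cons, h1, ih (l ++ " " ++ x)]
      rfl

theorem pv_join_foldl (t : List String) (l : String) :
    PySem.Str.join " " (l :: t) = pvJF l t := by
  show String.ofList (PySem.Chars.join (" ").toList (l.toList :: t.map String.toList)) = _
  have hsep : (" " : String).toList = [' '] := rfl
  show String.ofList (List.intercalate (" ").toList (l.toList :: t.map String.toList)) = _
  rw [hsep, pv_chars_join_foldl, pv_ofList_foldl]

theorem pv_str_ne_empty_of_toList {b : String} {cs : List Char} (h : b.toList = cs)
    (hne : cs ≠ []) : b ≠ "" := by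
  intro h0
  rw [h0] at h
  exact hne (by simpa using h.symm)

-- the merging loop + final flush, against B's segments, from a general buffer state
theorem pvCore : ∀ (ls : List String) (m : List String) (b : String) (sp j : List Char),
    (∀ l ∈ ls, pvNS l.toList) → b.toList = sp ++ j →
    (∀ c ∈ sp, PySem.Chars.isspace c = true) → pvNS j →
    (if (ls.foldl pvStep (m, b)).2 ≠ "" then
        (ls.foldl pvStep (m, b)).1 ++ [PySem.Str.strip (ls.foldl pvStep (m, b)).2]
      else (ls.foldl pvStep (m, b)).1)
    = m ++ pvJF (String.ofList j) (ls.takeWhile (fun x => !pvIsBoundary x))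
        :: (pvSegments (ls.dropWhile (fun x => !pvIsBoundary x))).map
            (fun segment => PySem.Str.join " " segment) := by
  intro ls
  induction ls with
  | nil =>
      intro m b sp j _ hb hsp hj
      have hbne := pv_str_ne_empty_of_toList hb (by simp [hj.1])
      have hstrip : PySem.Str.strip b = String.ofList j := by
        show String.ofList (PySem.Chars.strip b.toList) = _
        rw [hb, pv_strip_spaces sp j hsp hj]
      simp [hbne, hstrip, pvJF, pvSegments]
  | cons l t ih =>
      intro m b sp j hNS hb hsp hj
      have hbne := pv_str_ne_empty_of_toList hb (by simp [hj.1])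
      have hstrip : PySem.Str.strip b = String.ofList j := by
        show String.ofList (PySem.Chars.strip b.toList) = _
        rw [hb, pv_strip_spaces sp j hsp hj]
      have hlNS : pvNS l.toList := hNS l (by simp)
      by_cases hkw : pvIsBoundary l
      · have hstep : pvStep (m, b) l = (m ++ [PySem.Str.strip b], l) := by
          simp [pvStep, pvKw_eq, hkw, hbne]
        rw [List.foldl_cons, hstep]
        rw [ih (m ++ [PySem.Str.strip b]) l [] l.toList
              (fun x hx => hNS x (by simp [hx])) (by simp) (by simp) hlNS]
        rw [List.takeWhile_cons, List.dropWhile_cons]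
        simp only [hkw, Bool.not_true, if_false, Bool.false_eq_true]
        rw [pvSegments]
        simp [hstrip, pvJF, pv_join_foldl, String.ofList_toList]
      · have hstep : pvStep (m, b) l = (m, b ++ " " ++ l) := by
          simp [pvStep, pvKw_eq, hkw]
        rw [List.foldl_cons, hstep]
        have hb' : (b ++ " " ++ l).toList = sp ++ (j ++ ' ' :: l.toList) := by
          simp [String.toList_append, hb]
        rw [ih m (b ++ " " ++ l) sp (j ++ ' ' :: l.toList)
              (fun x hx => hNS x (by simp [hx])) hb' hsp
              (pvNS_append j l.toList hj hlNS)]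
        rw [List.takeWhile_cons, List.dropWhile_cons]
        simp only [hkw, Bool.not_false, if_true]
        have hof : String.ofList (j ++ ' ' :: l.toList) = String.ofList j ++ " " ++ l := by
          have : ' ' :: l.toList = [' '] ++ l.toList := rfl
          rw [this, pv_ofList_append, pv_ofList_append]
          simp [String.ofList_toList, String.append_assoc]
        simp [pvJF, hof]

theorem pv_allNS (lines0 : List String) :
    ∀ l ∈ (lines0.filter (fun line => PySem.Str.strip line ≠ "")).map PySem.Str.strip,
      pvNS l.toList := by
  intro l hl
  simp only [List.mem_map, List.mem_filter] at hl
  obtain ⟨x, ⟨-, hxne⟩, rfl⟩ := hl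
  have h1 : (PySem.Str.strip x).toList = PySem.Chars.strip x.toList := String.toList_ofList
  rw [h1]
  apply pvNS_of_strip
  intro h0
  have hx' : PySem.Str.strip x ≠ "" := by simpa using hxne
  apply hx'
  rw [show PySem.Str.strip x = String.ofList (PySem.Chars.strip x.toList) from rfl, h0]

theorem pv_lines_eq (td : List (String × List (String × String))) :
    td.foldl (fun acc p =>
        let page_text := PySem.Dict.getD ⟨p.2⟩ "text" ""
        if page_text ≠ "" then acc ++ PySem.Str.splitlines page_text else acc) []
    = (td.map (fun page_data => PySem.Dict.getD ⟨page_data.2⟩ "text" "")).flatMap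
        (fun chunk => if chunk ≠ "" then PySem.Str.splitlines chunk else []) := by
  rw [List.flatMap_map]
  suffices h : ∀ acc : List String,
      td.foldl (fun acc p =>
        let page_text := PySem.Dict.getD ⟨p.2⟩ "text" ""
        if page_text ≠ "" then acc ++ PySem.Str.splitlines page_text else acc) acc
      = acc ++ td.flatMap (fun p =>
          if PySem.Dict.getD ⟨p.2⟩ "text" "" ≠ "" then
            PySem.Str.splitlines (PySem.Dict.getD ⟨p.2⟩ "text" "") else []) by
    simpa using h []
  induction td with
  | nil => intro acc; simp
  | cons p t ih =>
      intro acc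
      simp only [List.foldl_cons, List.flatMap_cons]
      rw [ih]
      by_cases hp : PySem.Dict.getD ⟨p.2⟩ "text" "" = ""
      · simp [hp]
      · simp [hp]

-- ===== VERDICT (by name: the statement is the Claim_ definition above) =====
theorem buffer_and_merge_lines_spec : Claim_equal_buffer_and_merge_lines := by
  intro td _
  show buffer_and_merge_lines td = buffer_and_merge_lines_alt td
  unfold buffer_and_merge_lines buffer_and_merge_lines_alt
  rw [pv_lines_eq td]
  suffices h : ∀ ls : List String, (∀ l ∈ ls, pvNS l.toList) →
      (if (ls.foldl pvStep ([], "")).2 ≠ "" then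
          (ls.foldl pvStep ([], "")).1 ++ [PySem.Str.strip (ls.foldl pvStep ([], "")).2]
        else (ls.foldl pvStep ([], "")).1)
      = (pvSegments ls).map (fun segment => PySem.Str.join " " segment) by
    exact h _ (pv_allNS _)
  intro ls hNS
  cases ls with
  | nil => simp [pvSegments]
  | cons l t =>
      have hlNS : pvNS l.toList := hNS l (by simp)
      by_cases hkw : pvIsBoundary l
      · have hstep : pvStep ([], "") l = ([], l) := by
          simp [pvStep, pvKw_eq, hkw]
        rw [List.foldl_cons, hstep,
          pvCore t [] l [] l.toList (fun x hx => hNS x (by simp [hx])) (by simp) (by simp) hlNS]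
        rw [pvSegments]
        simp [pv_join_foldl, String.ofList_toList]
      · have hstep : pvStep ([], "") l = ([], "" ++ " " ++ l) := by
          simp [pvStep, pvKw_eq, hkw]
        have hb : ("" ++ " " ++ l).toList = [' '] ++ l.toList := by
          simp [String.toList_append]
        rw [List.foldl_cons, hstep,
          pvCore t [] ("" ++ " " ++ l) [' '] l.toList (fun x hx => hNS x (by simp [hx])) hb
            (by intro c hc; simp at hc; subst hc; rfl) hlNS]
        rw [pvSegments]
        simp [pv_join_foldl, String.ofList_toList]
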